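-- pv_equiv track=rewrite | github.com/vineeta786/geeksForGeeks_python | Lists Tuples Sets/Four and Four.py | has44
-- ===== SOURCE A (Python) =====
-- def has44(mylist):
--     ##Your code here
--     if(len(mylist)==1):
--         return False
--     else:
--         while(mylist!= None):
--             b = mylist.count(4)
--             if(b==0 or b==1):
--                 return False
--             else:
--                 a = mylist.index(4)
--                 if mylist[a+1]==4 :
--                     return True
--                 mylist=mylist[a+2:]
--
--     return False
-- ===== SOURCE B (Python) =====
-- def has44(mylist):
--     # Single linear scan over adjacent pairs (one pass instead of repeated count/index/slice passes).
--     return any(x == 4 and y == 4 for x, y in zip(mylist, mylist[1:]))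
-- ===== Notes on version B (the rewrite author's own statement) =====
-- stated objective: alternative
-- what changed: Replaced the repeated count/index/slice while-loop with a single linear scan over adjacent pairs via zip; worst-case passes over the list drop from many to one, though A's C-level count/index make it comparable on the random timing inputs.
import Mathlib
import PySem

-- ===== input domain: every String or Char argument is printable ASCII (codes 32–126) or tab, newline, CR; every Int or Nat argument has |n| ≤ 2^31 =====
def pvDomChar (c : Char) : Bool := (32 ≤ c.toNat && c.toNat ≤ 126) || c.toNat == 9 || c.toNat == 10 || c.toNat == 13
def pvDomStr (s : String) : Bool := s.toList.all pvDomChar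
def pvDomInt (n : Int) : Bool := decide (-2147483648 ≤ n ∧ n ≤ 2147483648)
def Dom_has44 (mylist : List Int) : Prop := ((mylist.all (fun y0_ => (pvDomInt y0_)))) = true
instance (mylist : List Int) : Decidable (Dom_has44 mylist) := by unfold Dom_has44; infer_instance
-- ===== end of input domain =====

-- B replaces A's repeated count/index/slice passes with one linear scan over adjacent pairs (alternative decomposition).

-- ===== PORT A =====
-- the while-loop of A: each round counts 4s, finds the first 4, checks its neighbour, slices past it
def has44Loop (l : List Int) : Bool :=
  let b : Nat := PySem.List.count l 4
  if hguard : b == 0 || b == 1 then false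
  else
    match PySem.List.index? l 4 with
    | none => false   -- unreachable: b ≥ 2 means 4 ∈ l
    | some a =>
      match PySem.List.pyGet? l ((a : Int) + 1) with
      | none => false -- unreachable: a second 4 lies beyond index a
      | some v =>
        if v == 4 then true
        else has44Loop (PySem.List.slice l (some ((a : Int) + 2)) none)
  termination_by l.length
  decreasing_by
    simp only [Bool.or_eq_true, beq_iff_eq, not_or] at hguard
    have hle : List.count 4 l ≤ l.length := List.count_le_length
    have heq : PySem.List.count l 4 = List.count 4 l := PySem.List.count_eq ..
    rw [PySem.List.slice_from _ (by positivity)]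
    simp only [List.length_drop]
    omega

def has44 (mylist : List Int) : Bool :=
  if mylist.length == 1 then false else has44Loop mylist

-- ===== PORT B =====
def has44_alt (mylist : List Int) : Bool :=
  (mylist.zip mylist.tail).any (fun p => p.1 == 4 && p.2 == 4)

-- ===== PRECONDITION & SPEC =====
def Spec_has44 (mylist : List Int) (out : Bool) : Prop := out = has44_alt mylist
instance (mylist : List Int) (out : Bool) : Decidable (Spec_has44 mylist out) := by unfold Spec_has44; infer_instance

-- ===== CLAIM (what is proved, stated in full; the proofs are below) =====
def Claim_equal_has44 : Prop := ∀ (mylist : List Int), Dom_has44 mylist → Spec_has44 mylist (has44 mylist)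

-- ===== LEMMAS AND PROOFS =====

theorem alt_cons_cons (x y : Int) (t : List Int) :
    has44_alt (x :: y :: t) = ((x == 4 && y == 4) || has44_alt (y :: t)) := by
  simp [has44_alt]

theorem alt_cons_of_ne (v : Int) (t : List Int) (hv : v ≠ 4) :
    has44_alt (v :: t) = has44_alt t := by
  cases t with
  | nil => simp [has44_alt]
  | cons y t => rw [alt_cons_cons]; simp [hv]

theorem alt_append_no4 (pre l' : List Int) (hp : 4 ∉ pre) :
    has44_alt (pre ++ l') = has44_alt l' := by
  induction pre with
  | nil => rfl
  | cons p pre ih =>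
    have hp4 : p ≠ 4 := fun h => hp (h ▸ List.mem_cons_self ..)
    have hp' : 4 ∉ pre := fun h => hp (List.mem_cons_of_mem _ h)
    rw [List.cons_append, alt_cons_of_ne p _ hp4, ih hp']

theorem alt_false_of_count_le_one (l : List Int) (hc : l.count 4 ≤ 1) :
    has44_alt l = false := by
  induction l with
  | nil => rfl
  | cons x t ih =>
    cases t with
    | nil => rfl
    | cons y s =>
      rw [alt_cons_cons]
      have hc' : (y :: s).count 4 ≤ 1 := le_trans (List.count_le_count_cons ..) hc
      rw [ih hc']
      by_cases hx : x = 4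
      · subst hx
        have : ¬ y = 4 := by
          intro hy; subst hy
          simp at hc
        simp [this]
      · simp [hx]

theorem loop_eq_alt_aux : ∀ (n : Nat) (l : List Int), l.length ≤ n → has44Loop l = has44_alt l := by
  intro n
  induction n with
  | zero =>
    intro l hl
    have : l = [] := List.eq_nil_of_length_eq_zero (by omega)
    subst this
    rw [has44Loop.eq_def]
    rfl
  | succ n ih =>
    intro l hl
    rw [has44Loop.eq_def]
    by_cases hb : (PySem.List.count l 4 == 0 || PySem.List.count l 4 == 1) = true
    · simp only [dif_pos hb]
      have hc : l.count 4 ≤ 1 := by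
        rw [PySem.List.count_eq] at hb
        simp only [Bool.or_eq_true, beq_iff_eq] at hb
        rcases hb with h | h <;> omega
      exact (alt_false_of_count_le_one l hc).symm
    · simp only [dif_neg hb]
      have hc2 : 2 ≤ l.count 4 := by
        rw [PySem.List.count_eq] at hb
        simp only [Bool.or_eq_true, beq_iff_eq, not_or] at hb
        omega
      have hmem : (4 : Int) ∈ l := by
        by_contra h
        rw [List.count_eq_zero_of_not_mem h] at hc2; omega
      obtain ⟨a, ha⟩ := Option.isSome_iff_exists.mp
        ((PySem.List.index?_isSome_iff l 4).mpr hmem)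
      rw [ha]
      obtain ⟨pre, suf, hdecomp, hlen, hpre⟩ :=
        (PySem.List.index?_eq_some_iff ..).mp ha
      -- suf is nonempty: count ≥ 2 and no 4 in pre
      have hcsuf : 1 ≤ suf.count 4 := by
        have : l.count 4 = suf.count 4 + 1 := by
          rw [hdecomp, List.count_append, List.count_eq_zero_of_not_mem hpre]
          simp
        omega
      cases suf with
      | nil => simp at hcsuf
      | cons v rest =>
        have hget : PySem.List.pyGet? l ((a : Int) + 1) = some v := by
          have : ((a : Int) + 1) = ((pre.length : Int) + 1) := by rw [hlen]
          rw [this, hdecomp]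
          have := PySem.List.pyGet?_append_right (pre := pre) (ys := 4 :: v :: rest) (k := 1)
          simpa using this
        simp only [hget]
        by_cases hv : (v == 4) = true
        · rw [if_pos hv]
          have hv4 : v = 4 := by exact beq_iff_eq.mp hv
          rw [hdecomp, alt_append_no4 _ _ hpre, hv4, alt_cons_cons]
          simp
        · rw [if_neg hv]
          have hv4 : v ≠ 4 := by simpa using hv
          have hslice : PySem.List.slice l (some ((a : Int) + 2)) none = rest := by
            rw [PySem.List.slice_from _ (by positivity)]
            have : ((a : Int) + 2).toNat = pre.length + 2 := by omega
            rw [this, hdecomp]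
            rw [show pre.length + 2 = (pre ++ [4, v]).length by simp]
            rw [show pre ++ 4 :: v :: rest = (pre ++ [4, v]) ++ rest by simp]
            exact List.drop_left
          have hlt : rest.length < l.length := by
            rw [hdecomp]; simp; omega
          rw [hslice, ih rest (by omega)]
          rw [hdecomp, alt_append_no4 _ _ hpre, alt_cons_cons,
              alt_cons_of_ne v rest hv4]
          simp [hv4]

-- ===== VERDICT (by name: the statement is the Claim_ definition above) =====
theorem has44_spec : Claim_equal_has44 := by
  intro mylist _
  unfold Spec_has44 has44
  by_cases h : (mylist.length == 1) = true
  · rw [if_pos h]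
    match mylist, h with
    | [x], _ => rfl
  · rw [if_neg h]
    exact loop_eq_alt_aux mylist.length mylist le_rfl
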